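-- pv_equiv track=rewrite | github.com/unabl4/codefights | where_to_gather/where_to_gather.py | whereToGather
-- ===== SOURCE A (Python) =====
-- def whereToGather(travel_costs):
--     h = len(travel_costs)
--     w = len(travel_costs[0])
--
--     min_gather_sum = -1
--     for c in range(w): # columns
--         values = [travel_costs[r][c] for r in range(h)]
--         valid = 1
--         for v in values:
--             if v == -1: # not possibru :)
--                 valid = 0 # too sad there are no labeled loops in python
--                 break
--
--         if not valid:
--             continue
--
--         gather_sum = sum(values)
--         if min_gather_sum == -1 or gather_sum < min_gather_sum:
--             min_gather_sum = gather_sum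
--
--     return min_gather_sum
-- ===== SOURCE B (Python) =====
-- def whereToGather(travel_costs):
--     # Row-major accumulation: one pass over rows building per-column sums and
--     # an invalid flag, then a separate min-selection pass over columns.
--     w = len(travel_costs[0])
--     col_sum = [0] * w
--     invalid = [False] * w
--     for row in travel_costs:
--         col_sum = [s + v for s, v in zip(col_sum, row)]
--         invalid = [b or (v == -1) for b, v in zip(invalid, row)]
--     best = -1
--     for c in range(w):
--         if not invalid[c]:
--             if best == -1 or col_sum[c] < best:
--                 best = col_sum[c]
--     return best
-- ===== Notes on version B (the rewrite author's own statement) =====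
-- stated objective: alternative
-- what changed: A scans column-by-column, rebuilding each column list and re-scanning it for -1 before summing; B makes one row-major pass maintaining per-column running sums and invalid flags via zips, then a separate flat min-selection pass over columns.
import Mathlib
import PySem

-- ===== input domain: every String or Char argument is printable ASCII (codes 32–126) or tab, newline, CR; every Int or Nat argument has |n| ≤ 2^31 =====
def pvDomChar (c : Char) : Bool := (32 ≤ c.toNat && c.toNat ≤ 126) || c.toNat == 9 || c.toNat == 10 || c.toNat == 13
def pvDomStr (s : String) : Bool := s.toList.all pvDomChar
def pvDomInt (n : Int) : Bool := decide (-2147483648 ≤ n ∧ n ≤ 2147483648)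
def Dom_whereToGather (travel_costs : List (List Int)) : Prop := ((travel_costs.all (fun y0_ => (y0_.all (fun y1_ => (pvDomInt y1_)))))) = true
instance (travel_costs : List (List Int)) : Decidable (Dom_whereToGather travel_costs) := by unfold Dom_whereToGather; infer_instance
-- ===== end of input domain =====

-- B differs from A only in decomposition (row-major accumulation vs column-major scans); same values everywhere A returns.

-- ===== PORT A =====
-- A's inner 'for v in values: if v == -1: valid = 0; break' loop
def pvCheckValid : List Int → Int
  | [] => 1
  | v :: rest => if v == -1 then 0 else pvCheckValid rest

def whereToGather (travel_costs : List (List Int)) : Int :=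
  let h := travel_costs.length
  let w := (travel_costs.headD []).length
  (PySem.List.pyRange 0 (w : Int) 1).foldl
    (fun min_gather_sum c =>
      let values := (PySem.List.pyRange 0 (h : Int) 1).map
        (fun r => PySem.List.pyGetD (PySem.List.pyGetD travel_costs r []) c 0)
      if pvCheckValid values == 0 then min_gather_sum
      else
        let gather_sum := values.foldl (· + ·) 0
        if min_gather_sum == -1 || gather_sum < min_gather_sum then gather_sum
        else min_gather_sum)
    (-1)

-- ===== PORT B =====
def whereToGather_alt (travel_costs : List (List Int)) : Int :=
  let w := (travel_costs.headD []).length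
  let st := travel_costs.foldl
    (fun (st : List Int × List Bool) row =>
      (st.1.zipWith (· + ·) row, st.2.zipWith (fun b v => b || (v == -1)) row))
    (List.replicate w 0, List.replicate w false)
  (PySem.List.pyRange 0 (w : Int) 1).foldl
    (fun best c =>
      if PySem.List.pyGetD st.2 c false then best
      else if best == -1 || PySem.List.pyGetD st.1 c 0 < best then PySem.List.pyGetD st.1 c 0
      else best)
    (-1)

-- ===== PRECONDITION & SPEC =====
-- Pre_ excludes exactly the inputs where A raises IndexError: the empty matrix
-- (travel_costs[0]) and matrices with a row shorter than the first row.
def Pre_whereToGather (travel_costs : List (List Int)) : Prop :=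
  travel_costs ≠ [] ∧ ∀ row ∈ travel_costs, (travel_costs.headD []).length ≤ row.length
instance (travel_costs : List (List Int)) : Decidable (Pre_whereToGather travel_costs) := by
  unfold Pre_whereToGather; infer_instance

def pvWitness_whereToGather : List (List Int) := [[1, 2], [3, 4]]

def Spec_whereToGather (travel_costs : List (List Int)) (out : Int) : Prop := out = whereToGather_alt travel_costs
instance (travel_costs : List (List Int)) (out : Int) : Decidable (Spec_whereToGather travel_costs out) := by unfold Spec_whereToGather; infer_instance

-- ===== CLAIM (what is proved, stated in full; the proofs are below) =====
def Claim_equal_whereToGather : Prop := ∀ (travel_costs : List (List Int)), Dom_whereToGather travel_costs → Pre_whereToGather travel_costs → Spec_whereToGather travel_costs (whereToGather travel_costs)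

-- ===== LEMMAS AND PROOFS =====

theorem pvCheckValid_eq (l : List Int) :
    pvCheckValid l = if l.any (fun v => v == -1) then 0 else 1 := by
  induction l with
  | nil => simp [pvCheckValid]
  | cons v rest ih =>
    simp only [pvCheckValid, List.any_cons, ih]
    by_cases h : v = -1 <;> simp [h]

-- invariant of B's row-fold: running column sums and invalid flags
theorem pvFold_spec (w : Nat) (tcs : List (List Int)) :
    ∀ (s : List Int) (inv : List Bool), s.length = w → inv.length = w →
    (∀ row ∈ tcs, w ≤ row.length) →
    (tcs.foldl (fun (st : List Int × List Bool) row =>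
        (st.1.zipWith (· + ·) row, st.2.zipWith (fun b v => b || (v == -1)) row))
       (s, inv)).1.length = w ∧
    (tcs.foldl (fun (st : List Int × List Bool) row =>
        (st.1.zipWith (· + ·) row, st.2.zipWith (fun b v => b || (v == -1)) row))
       (s, inv)).2.length = w ∧
    ∀ c : Nat, c < w →
      (tcs.foldl (fun (st : List Int × List Bool) row =>
          (st.1.zipWith (· + ·) row, st.2.zipWith (fun b v => b || (v == -1)) row))
         (s, inv)).1.getD c 0
        = s.getD c 0 + (tcs.map (fun row => row.getD c 0)).sum ∧
      (tcs.foldl (fun (st : List Int × List Bool) row =>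
          (st.1.zipWith (· + ·) row, st.2.zipWith (fun b v => b || (v == -1)) row))
         (s, inv)).2.getD c false
        = (inv.getD c false || tcs.any (fun row => row.getD c 0 == -1)) := by
  induction tcs with
  | nil =>
    intro s inv hs hinv _
    simp [hs, hinv]
  | cons row rest ih =>
    intro s inv hs hinv hrows
    have hrow : w ≤ row.length := hrows row (by simp)
    have hrest : ∀ r ∈ rest, w ≤ r.length := fun r hr => hrows r (by simp [hr])
    have hs' : (s.zipWith (· + ·) row).length = w := by
      simp [List.length_zipWith, hs]; omega
    have hinv' : (inv.zipWith (fun b v => b || (v == -1)) row).length = w := by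
      simp [List.length_zipWith, hinv]; omega
    obtain ⟨h1, h2, h3⟩ := ih (s.zipWith (· + ·) row)
      (inv.zipWith (fun b v => b || (v == -1)) row) hs' hinv' hrest
    refine ⟨h1, h2, ?_⟩
    intro c hc
    obtain ⟨h4, h5⟩ := h3 c hc
    constructor
    · rw [List.foldl_cons] at *
      rw [h4]
      have hcs : c < s.length := by omega
      have hcr : c < row.length := by omega
      have : (s.zipWith (· + ·) row).getD c 0 = s.getD c 0 + row.getD c 0 := by
        rw [List.getD_eq_getElem _ _ (by rw [hs']; omega),
            List.getD_eq_getElem _ _ hcs, List.getD_eq_getElem _ _ hcr,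
            List.getElem_zipWith]
      rw [this]
      simp [add_assoc]
    · rw [List.foldl_cons] at *
      rw [h5]
      have hci : c < inv.length := by omega
      have hcr : c < row.length := by omega
      have : (inv.zipWith (fun b v => b || (v == -1)) row).getD c false
          = (inv.getD c false || (row.getD c 0 == -1)) := by
        rw [List.getD_eq_getElem _ _ (by rw [hinv']; omega),
            List.getD_eq_getElem _ _ hci, List.getD_eq_getElem _ _ hcr,
            List.getElem_zipWith]
      rw [this]
      simp [Bool.or_assoc]

-- A's per-column values list is just the column read off each row
theorem pvValues_eq (tcs : List (List Int)) (c : Int) :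
    (PySem.List.pyRange 0 (tcs.length : Int) 1).map
        (fun r => PySem.List.pyGetD (PySem.List.pyGetD tcs r []) c 0)
      = tcs.map (fun row => PySem.List.pyGetD row c 0) := by
  have h := PySem.List.map_pyGetD_pyRange_zero' (xs := tcs) (d := ([] : List Int))
  conv_rhs => rw [← h]
  rw [List.map_map]
  rfl

-- ===== VERDICT (by name: the statement is the Claim_ definition above) =====
theorem whereToGather_spec : Claim_equal_whereToGather := by
  intro tcs _ hpre
  unfold Spec_whereToGather
  obtain ⟨hne, hrows⟩ := hpre
  simp only [whereToGather, whereToGather_alt]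
  set w := (tcs.headD []).length with hw
  obtain ⟨hlen1, hlen2, hpt⟩ := pvFold_spec w tcs
    (List.replicate w 0) (List.replicate w false) (by simp) (by simp) hrows
  apply PySem.List.foldl_congr_mem
  intro acc c hc
  rw [PySem.List.mem_pyRange_one] at hc
  have hcw : c.toNat < w := by omega
  obtain ⟨hsum, hinv⟩ := hpt c.toNat hcw
  have hcnat : ((c.toNat : Int)) = c := by omega
  rw [pvValues_eq, ← hcnat]
  simp only [PySem.List.pyGetD_natCast]
  rw [hsum, hinv, pvCheckValid_eq, List.any_map]
  have hz : (List.replicate w (0:Int)).getD c.toNat 0 = 0 := by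
    rw [List.getD_eq_getElem?_getD, List.getElem?_replicate]; split <;> rfl
  have hf : (List.replicate w false).getD c.toNat false = false := by
    rw [List.getD_eq_getElem?_getD, List.getElem?_replicate]; split <;> rfl
  simp only [Function.comp_def, hz, hf, zero_add, Bool.false_or, List.sum_eq_foldl]
  by_cases htest : (tcs.any fun x => x.getD c.toNat 0 == -1) = true <;> simp_all
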